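-- pv_equiv track=rewrite | github.com/fabenitez/elTatoApp | resources/Logger.py | __alphanumeric
-- ===== SOURCE A (Python) =====
-- def __alphanumeric(password):		# debe ser alfanumerica
-- 	txt=tuple(password)
--
-- 	alpha=False
-- 	numbe=False
--
-- 	for postxt in txt:
-- 		if postxt.isalnum():
-- 			alpha=True
-- 		if postxt.isnumeric():
-- 			numbe=True
-- 	if alpha and numbe:
-- 		return True
-- 	else:
-- 		return False
-- ===== SOURCE B (Python) =====
-- def __alphanumeric(password):
--     # A returns True iff some char is alnum AND some char is numeric.
--     # Every numeric character is alnum in Python, so the whole check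
--     # reduces to: does the password contain a numeric character?
--     return any(c.isnumeric() for c in password)
-- ===== Notes on version B (the rewrite author's own statement) =====
-- stated objective: simpler
-- what changed: The two-flag accumulation loop plus final conjunction is replaced by a single short-circuiting any() over one predicate, using the fact that every numeric character is alphanumeric, so the alnum flag is redundant.
import Mathlib
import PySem

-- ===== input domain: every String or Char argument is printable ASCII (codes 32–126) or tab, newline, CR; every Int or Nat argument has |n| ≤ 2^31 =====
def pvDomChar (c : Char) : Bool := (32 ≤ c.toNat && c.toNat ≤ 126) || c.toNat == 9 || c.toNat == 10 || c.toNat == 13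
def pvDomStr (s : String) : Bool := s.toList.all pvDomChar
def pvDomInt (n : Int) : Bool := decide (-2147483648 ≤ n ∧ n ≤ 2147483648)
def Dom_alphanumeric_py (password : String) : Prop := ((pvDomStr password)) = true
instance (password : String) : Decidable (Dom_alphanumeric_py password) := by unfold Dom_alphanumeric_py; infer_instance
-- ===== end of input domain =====

-- ===== PORT A =====
-- Literal port of A: one pass over tuple(password) maintaining the two flags,
-- then the final 'if alpha and numbe'.  'isnumeric' is ported as PySem.Chars.isdigit,
-- exact on the printable-ASCII domain (no non-ASCII numerics there).
def alphanumeric_py (password : String) : Bool :=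
  let txt := password.toList
  let st := txt.foldl (fun (fl : Bool × Bool) postxt =>
      (if PySem.Chars.isalnum postxt then true else fl.1,
       if PySem.Chars.isdigit postxt then true else fl.2)) (false, false)
  if st.1 && st.2 then true else false

-- ===== PORT B =====
-- Port of B: any(c.isnumeric() for c in password); isnumeric = isdigit on ASCII.
def alphanumeric_py_alt (password : String) : Bool :=
  password.toList.any PySem.Chars.isdigit

-- ===== PRECONDITION & SPEC =====
def Spec_alphanumeric_py (password : String) (out : Bool) : Prop := out = alphanumeric_py_alt password
instance (password : String) (out : Bool) : Decidable (Spec_alphanumeric_py password out) := by unfold Spec_alphanumeric_py; infer_instance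

-- ===== CLAIM (what is proved, stated in full; the proofs are below) =====
def Claim_equal_alphanumeric_py : Prop := ∀ (password : String), Dom_alphanumeric_py password → Spec_alphanumeric_py password (alphanumeric_py password)

-- ===== LEMMAS AND PROOFS =====

-- ===== (verdict below) =====
-- Fold characterisation: the flags are 'a ∨ any isalnum' and 'n ∨ any isdigit'.
theorem pvFoldFlags (l : List Char) (a n : Bool) :
    l.foldl (fun (fl : Bool × Bool) postxt =>
      (if PySem.Chars.isalnum postxt then true else fl.1,
       if PySem.Chars.isdigit postxt then true else fl.2)) (a, n)
    = (a || l.any PySem.Chars.isalnum, n || l.any PySem.Chars.isdigit) := by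
  induction l generalizing a n with
  | nil => simp
  | cons c t ih =>
    simp only [List.foldl_cons, List.any_cons, ih]
    apply Prod.ext <;> dsimp <;> split <;> simp [*]

-- On ASCII a digit is alphanumeric.
theorem pvDigit_alnum (c : Char) (h : PySem.Chars.isdigit c = true) :
    PySem.Chars.isalnum c = true := by
  unfold PySem.Chars.isalnum PySem.Chars.isdigit at *
  simp_all

-- ===== VERDICT (by name: the statement is the Claim_ definition above) =====
theorem alphanumeric_py_spec : Claim_equal_alphanumeric_py := by
  intro password _
  unfold Spec_alphanumeric_py alphanumeric_py alphanumeric_py_alt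
  simp only [pvFoldFlags, Bool.false_or]
  cases hd : (password.toList.any PySem.Chars.isdigit) with
  | false => simp
  | true =>
    obtain ⟨c, hc, hdig⟩ := List.any_eq_true.mp hd
    simp [List.any_eq_true.mpr ⟨c, hc, pvDigit_alnum c hdig⟩]
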